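-- pv_equiv track=rewrite | github.com/boostcamp-5th-NLP05/programmers-study | youngjun/3_숫자 게임.py | solution
-- ===== SOURCE A (Python) =====
-- from bisect import bisect_right
--
-- def solution(A, B):
--     answer = 0
--     B.sort()
--     for i in A:
--         tmp = bisect_right(B,i)
--         if tmp == len(B):
--             del B[0]
--         else:
--             del B[tmp]
--             answer += 1
--     return answer
-- ===== SOURCE B (Python) =====
-- def solution(A, B):
--     # Sort both sides once and count wins with a single two-pointer sweep:
--     # each b (ascending) beats the smallest still-unbeaten a if it can.
--     B.sort()
--     A2 = sorted(A)
--     i = 0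
--     for b in B:
--         if i < len(A2) and b > A2[i]:
--             i += 1
--     return i
-- ===== Notes on version B (the rewrite author's own statement) =====
-- stated objective: faster
-- what changed: Replaces the per-A-element bisect-and-delete simulation on a mutating list (each delete is O(n)) by sorting both lists once and counting matches in a single two-pointer sweep over B.
import Mathlib
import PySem

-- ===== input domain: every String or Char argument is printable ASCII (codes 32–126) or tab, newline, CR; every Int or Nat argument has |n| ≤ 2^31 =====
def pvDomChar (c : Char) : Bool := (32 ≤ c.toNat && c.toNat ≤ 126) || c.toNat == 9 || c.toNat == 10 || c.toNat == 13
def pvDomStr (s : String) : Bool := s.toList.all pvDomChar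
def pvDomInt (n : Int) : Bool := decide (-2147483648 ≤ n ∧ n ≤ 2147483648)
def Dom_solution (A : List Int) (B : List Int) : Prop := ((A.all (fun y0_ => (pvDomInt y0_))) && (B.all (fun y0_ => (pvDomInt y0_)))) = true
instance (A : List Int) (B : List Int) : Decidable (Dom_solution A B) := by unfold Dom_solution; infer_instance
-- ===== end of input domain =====

-- B replaces A's bisect+delete simulation by sort-both + one two-pointer sweep (faster);
-- equivalence is about the RETURN value only: Python A (and B) mutate the argument B in place.

-- ===== PORT A =====
-- one loop iteration of A: state = (current list B, answer)
def solStep (s : List Int × Int) (i : Int) : List Int × Int :=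
  let tmp := PySem.List.bisectRight s.1 i
  if tmp = s.1.length then (s.1.eraseIdx 0, s.2)
  else (s.1.eraseIdx tmp, s.2 + 1)

def solution (A : List Int) (B : List Int) : Int :=
  let Bs := PySem.List.sorted B (fun x => x)
  (A.foldl solStep (Bs, 0)).2

-- ===== PORT B =====
-- one loop iteration of B: state = i (matched-so-far pointer into sorted A)
def altStep (As : List Int) (i : Int) (b : Int) : Int :=
  if i < (As.length : Int) then
    match PySem.List.pyGet? As i with
    | some a => if a < b then i + 1 else i
    | none => i
  else i

def solution_alt (A : List Int) (B : List Int) : Int :=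
  let Bs := PySem.List.sorted B (fun x => x)
  let As := PySem.List.sorted A (fun x => x)
  Bs.foldl (altStep As) 0

-- ===== PRECONDITION & SPEC =====
-- A raises IndexError (del on an exhausted B) exactly when len(A) > len(B); Pre_ excludes those inputs.
def Pre_solution (A : List Int) (B : List Int) : Prop := A.length ≤ B.length
instance (A : List Int) (B : List Int) : Decidable (Pre_solution A B) := by unfold Pre_solution; infer_instance
def pvWitness_solution : List Int × List Int := ([1, 4], [2, 3, 5])

def Spec_solution (A : List Int) (B : List Int) (out : Int) : Prop := out = solution_alt A B
instance (A : List Int) (B : List Int) (out : Int) : Decidable (Spec_solution A B out) := by unfold Spec_solution; infer_instance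

-- ===== CLAIM (what is proved, stated in full; the proofs are below) =====
def Claim_equal_solution : Prop := ∀ (A : List Int) (B : List Int), Dom_solution A B → Pre_solution A B → Spec_solution A B (solution A B)

-- ===== LEMMAS AND PROOFS =====

-- "some remaining b beats a"
def wn (a : Int) (s : List Int) : Bool := s.any (fun y => a < y)

-- A's one-step effect on a sorted list, written recursively
def step1 (a : Int) : List Int → List Int
  | [] => []
  | x :: r => if a < x then r else if wn a r then x :: step1 a r else r

def stepP (s : List Int × Int) (a : Int) : List Int × Int :=
  (step1 a s.1, if wn a s.1 then s.2 + 1 else s.2)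

-- the two-pointer count, recursively on the B side
def tp (l s : List Int) : Int :=
  match l, s with
  | _, [] => 0
  | [], _ :: _ => 0
  | a :: l', b :: s' => if a < b then 1 + tp l' s' else tp (a :: l') s'
termination_by s.length
decreasing_by all_goals simp

theorem wn_cons (a x : Int) (r : List Int) : wn a (x :: r) = (decide (a < x) || wn a r) := by
  simp [wn]

theorem wn_mono_le {a b : Int} {s : List Int} (hab : a ≤ b) (h : wn b s = true) : wn a s = true := by
  simp only [wn, List.any_eq_true] at *
  obtain ⟨y, hy, hby⟩ := h
  exact ⟨y, hy, by simp at hby ⊢; omega⟩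

theorem wn_sublist {a : Int} {t s : List Int} (hsub : List.Sublist t s) (h : wn a t = true) : wn a s = true := by
  simp only [wn, List.any_eq_true] at *
  obtain ⟨y, hy, hay⟩ := h
  exact ⟨y, hsub.mem hy, hay⟩

theorem step1_sublist (a : Int) (s : List Int) : List.Sublist (step1 a s) s := by
  induction s with
  | nil => simp [step1]
  | cons x r ih =>
    simp only [step1]
    split
    · exact (List.sublist_cons_self x r)
    · split
      · exact ih.cons₂ x
      · exact List.sublist_cons_self x r

theorem step1_sorted {a : Int} {s : List Int} (h : s.Pairwise (· ≤ ·)) :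
    (step1 a s).Pairwise (· ≤ ·) := h.sublist (step1_sublist a s)

theorem step1_length {a : Int} {s : List Int} (h : s ≠ []) :
    (step1 a s).length = s.length - 1 := by
  induction s with
  | nil => simp at h
  | cons x r ih =>
    simp only [step1]
    split
    · simp
    · split
      · rename_i hw
        have hr : r ≠ [] := by
          rintro rfl; simp [wn] at hw
        have h1 : 1 ≤ r.length := List.length_pos_iff.mpr hr
        simp only [List.length_cons]
        rw [ih hr]
        omega
      · simp

theorem only_gt {a b : Int} {s : List Int} (hs : s.Pairwise (· ≤ ·)) (hab : a ≤ b)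
    (hb : wn b s = true) (hb' : wn b (step1 a s) = false) : step1 a s = step1 b s := by
  induction s with
  | nil => simp [wn] at hb
  | cons y t ih =>
    by_cases hay : a < y
    · have hstep : step1 a (y :: t) = t := by simp [step1, hay]
      rw [hstep] at hb' ⊢
      by_cases hby : b < y
      · simp [step1, hby]
      · rw [wn_cons] at hb
        simp [hby] at hb
        simp [hb] at hb'
    · have hby : ¬ b < y := by omega
      rw [wn_cons] at hb
      simp [hby] at hb
      have hat : wn a t = true := wn_mono_le hab hb
      have hstep : step1 a (y :: t) = y :: step1 a t := by simp [step1, hay, hat]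
      rw [hstep] at hb' ⊢
      rw [wn_cons] at hb'
      simp [hby] at hb'
      have hrec := ih (List.pairwise_cons.mp hs).2 hb hb'
      simp [step1, hby, hb, hrec]

theorem step1_cons (a x : Int) (r : List Int) :
    step1 a (x :: r) = if a < x then r else if wn a r then x :: step1 a r else r := rfl

theorem step1_loser {a : Int} {s : List Int} (h : wn a s = false) : step1 a s = s.tail := by
  cases s with
  | nil => rfl
  | cons x r =>
    rw [wn_cons] at h
    simp only [Bool.or_eq_false_iff, decide_eq_false_iff_not] at h
    simp [step1, h.1, h.2]

theorem wn_step1_false {a b : Int} {s : List Int} (h : wn b s = false) :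
    wn b (step1 a s) = false := by
  by_contra hc
  simp only [Bool.not_eq_false] at hc
  have := wn_sublist (step1_sublist a s) hc
  simp [this] at h

-- the core exchange: two consecutive steps commute on a sorted list of length ≥ 2
theorem comm_le {a b c : Int} {s : List Int} (hs : s.Pairwise (· ≤ ·)) (hlen : 2 ≤ s.length)
    (hab : a ≤ b) : stepP (stepP (s, c) a) b = stepP (stepP (s, c) b) a := by
  induction s generalizing c with
  | nil => simp at hlen
  | cons x r ih =>
    have hxr : ∀ z ∈ r, x ≤ z := (List.pairwise_cons.mp hs).1
    have hr : r.Pairwise (· ≤ ·) := (List.pairwise_cons.mp hs).2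
    have hrne : r ≠ [] := by
      rintro rfl; simp at hlen
    by_cases hbx : b < x
    · -- b < x: both steps win against the two smallest elements
      have hax : a < x := by omega
      rcases r with _ | ⟨y, r'⟩
      · exact absurd rfl hrne
      have hxy : x ≤ y := hxr y (by simp)
      have hay : a < y := by omega
      have hby : b < y := by omega
      simp [stepP, step1, wn_cons, hax, hbx, hay, hby]
    · by_cases hax : a < x
      · -- a < x ≤ b
        rcases r with _ | ⟨y, r'⟩
        · exact absurd rfl hrne
        have hxy : x ≤ y := hxr y (by simp)
        have hay : a < y := by omega
        by_cases hwbr : wn b (y :: r') = true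
        · simp [stepP, step1, wn_cons, hax, hbx, hwbr, hay]
        · simp only [Bool.not_eq_true] at hwbr
          rw [wn_cons] at hwbr
          simp only [Bool.or_eq_false_iff, decide_eq_false_iff_not] at hwbr
          simp [stepP, step1, wn_cons, hax, hbx, hwbr.1, hwbr.2, hay]
      · -- x ≤ a ≤ b
        have hxa : ¬ a < x := hax
        by_cases hwar : wn a r = true
        · by_cases hwbr : wn b r = true
          · -- both win inside r
            by_cases hr2 : 2 ≤ r.length
            · have hIH := ih hr hr2 (c := c)
              have hfst := congrArg Prod.fst hIH
              have hsnd := congrArg Prod.snd hIH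
              simp only [stepP, hwar, hwbr, if_pos] at hfst hsnd
              by_cases hwb' : wn b (step1 a r) = true
              · have hwa' : wn a (step1 b r) = true := by
                  by_contra hwa'
                  simp only [Bool.not_eq_true] at hwa'
                  simp [hwb', hwa'] at hsnd
                simp [stepP, step1, wn_cons, hxa, hbx, hwar, hwbr, hwb', hwa', hfst]
              · have hwa' : wn a (step1 b r) = false := by
                  by_contra hwa'
                  simp only [Bool.not_eq_false] at hwa'
                  simp [hwb', hwa'] at hsnd
                simp only [Bool.not_eq_true] at hwb'
                have heq : step1 a r = step1 b r := only_gt hr hab hwbr hwb'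
                simp [stepP, step1, wn_cons, hxa, hbx, hwar, hwbr, hwb', hwa', heq]
                rw [← heq]
                simp [hwb']
            · -- r = [y] with b < y
              rcases r with _ | ⟨y, r'⟩
              · exact absurd rfl hrne
              rcases r' with _ | ⟨z, r''⟩
              · have hby : b < y := by
                  by_contra hby
                  simp [wn_cons, wn, hby] at hwbr
                have hay : a < y := by omega
                simp [stepP, step1, wn_cons, wn, hxa, hbx, hay, hby, (show ¬ b < x by omega)]
              · simp at hr2
          · -- a wins inside r, b loses everywhere
            simp only [Bool.not_eq_true] at hwbr
            have hwbx : wn b (x :: r) = false := by simp [wn_cons, hbx, hwbr]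
            have hwax : wn a (x :: r) = true := by rw [wn_cons, hwar]; simp
            have h1 : step1 a (x :: r) = x :: step1 a r := by
              simp [step1_cons, hxa, hwar]
            have hwb2 : wn b (x :: step1 a r) = false := by
              simp [wn_cons, hbx, wn_step1_false hwbr]
            have hL : stepP (stepP (x :: r, c) a) b = (step1 a r, c + 1) := by
              simp [stepP, h1, hwax, hwb2, step1_loser hwb2]
            have hR : stepP (stepP (x :: r, c) b) a = (step1 a r, c + 1) := by
              simp [stepP, step1_loser hwbx, hwbx, hwar]
            rw [hL, hR]
        · -- a (and hence b) loses everywhere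
          simp only [Bool.not_eq_true] at hwar
          have hwbrf : wn b r = false := by
            by_contra hc2
            simp only [Bool.not_eq_false] at hc2
            simp [wn_mono_le hab hc2] at hwar
          rcases r with _ | ⟨y, r'⟩
          · exact absurd rfl hrne
          rw [wn_cons] at hwar hwbrf
          simp only [Bool.or_eq_false_iff, decide_eq_false_iff_not] at hwar hwbrf
          simp [stepP, step1, wn_cons, hxa, hbx, hwar.1, hwar.2, hwbrf.1, hwbrf.2]

theorem comm' {a b c : Int} {s : List Int} (hs : s.Pairwise (· ≤ ·)) (hlen : 2 ≤ s.length) :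
    stepP (stepP (s, c) a) b = stepP (stepP (s, c) b) a := by
  rcases le_total a b with h | h
  · exact comm_le hs hlen h
  · exact (comm_le hs hlen h).symm

theorem foldl_perm {l l' : List Int} (hp : l.Perm l') :
    ∀ s c, s.Pairwise (· ≤ ·) → l.length ≤ s.length →
    l.foldl stepP (s, c) = l'.foldl stepP (s, c) := by
  induction hp with
  | nil => intro s c _ _; rfl
  | cons x h ih =>
    rename_i l₁ l₂
    intro s c hs hlen
    simp only [List.foldl_cons]
    have hne : s ≠ [] := by
      rintro rfl; simp at hlen
    have h1 : (stepP (s, c) x).1 = step1 x s := rfl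
    have hlen' : l₁.length ≤ (stepP (s, c) x).1.length := by
      rw [h1, step1_length hne]
      have := List.length_pos_iff.mpr hne
      simp at hlen
      omega
    have := ih (stepP (s, c) x).1 (stepP (s, c) x).2 (by rw [h1]; exact step1_sorted hs) hlen'
    simpa using this
  | swap x y l =>
    intro s c hs hlen
    simp only [List.foldl_cons]
    rw [comm' hs (by simp at hlen; omega)]
  | trans h1 h2 ih1 ih2 =>
    intro s c hs hlen
    rw [ih1 s c hs hlen, ih2 s c hs (by rw [← h1.length_eq]; exact hlen)]

theorem tp_nil_left (s : List Int) : tp [] s = 0 := by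
  cases s <;> simp [tp]

theorem tp_nil_right (l : List Int) : tp l [] = 0 := by
  cases l <;> simp [tp]

-- head of the B side smaller than everything on the A side is skipped
theorem tp_skip {x : Int} {l X : List Int} (h : ∀ y ∈ l, x ≤ y) : tp l (x :: X) = tp l X := by
  cases l with
  | nil => rw [tp_nil_left, tp_nil_left]
  | cons y t =>
    have : ¬ y < x := by have := h y (by simp); omega
    simp [tp, this]

-- if no b can beat any a, the count is 0
theorem tp_zero {a : Int} {l s : List Int} (hl : ∀ y ∈ l, a ≤ y) (hscond : ∀ z ∈ s, z ≤ a) :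
    tp l s = 0 := by
  induction s with
  | nil => exact tp_nil_right l
  | cons z s' ih =>
    cases l with
    | nil => exact tp_nil_left _
    | cons y t =>
      have : ¬ y < z := by
        have h1 := hl y (by simp)
        have h2 := hscond z (by simp)
        omega
      simp only [tp, if_neg this]
      exact ih (fun z hz => hscond z (by simp [hz]))

-- one A-element absorbed into the two-pointer count
theorem tp_step {a : Int} {l' s : List Int} (hs : s.Pairwise (· ≤ ·)) (hl : ∀ y ∈ l', a ≤ y) :
    tp (a :: l') s = (if wn a s then 1 else 0) + tp l' (step1 a s) := by
  induction s with
  | nil => simp [tp_nil_right, wn, step1]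
  | cons x s' ih =>
    have hxs' : ∀ z ∈ s', x ≤ z := fun z hz => (List.pairwise_cons.mp hs).1 z hz
    by_cases hax : a < x
    · simp [tp, hax, step1, wn_cons]
    · rw [wn_cons]
      simp only [step1, if_neg hax]
      have h1 : tp (a :: l') (x :: s') = tp (a :: l') s' := by
        simp [tp, hax]
      rw [h1, ih (List.pairwise_cons.mp hs).2]
      by_cases hw : wn a s' = true
      · have h2 : tp l' (x :: step1 a s') = tp l' (step1 a s') :=
          tp_skip (by intro y hy; have := hl y hy; omega)
        simp [hw, hax, h2]
      · have hall : ∀ z ∈ s', z ≤ a := by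
          intro z hz
          by_contra hc
          exact hw (by simp [wn, List.any_eq_true]; exact ⟨z, hz, by omega⟩)
        have hz1 : tp l' (step1 a s') = 0 :=
          tp_zero hl (fun z hz => hall z ((step1_sublist a s').mem hz))
        have hz2 : tp l' s' = 0 := tp_zero hl hall
        simp [hw, hax, hz1, hz2]

-- main loop invariant: folding A's steps over sorted s counts tp
theorem main_fold : ∀ (l : List Int) (s : List Int) (c : Int),
    l.Pairwise (· ≤ ·) → s.Pairwise (· ≤ ·) →
    (l.foldl stepP (s, c)).2 = c + tp l s := by
  intro l
  induction l with
  | nil => intro s c _ _; simp [tp_nil_left]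
  | cons a l' ih =>
    intro s c hl hs
    simp only [List.foldl_cons]
    have h1 : stepP (s, c) a = (step1 a s, if wn a s then c + 1 else c) := rfl
    rw [h1, ih _ _ (List.pairwise_cons.mp hl).2 (step1_sorted hs)]
    rw [tp_step hs (List.pairwise_cons.mp hl).1]
    split <;> ring

-- bisect_right on a sorted list is the takeWhile length
theorem bisect_tw {s : List Int} (a : Int) (hs : s.Pairwise (· ≤ ·)) :
    PySem.List.bisectRight s a = (s.takeWhile (fun x => decide (x ≤ a))).length := by
  obtain ⟨hk1, hk2, hk3⟩ := PySem.List.bisectRight_spec s a hs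
  set k := PySem.List.bisectRight s a with hk
  set tw := s.takeWhile (fun x => decide (x ≤ a)) with htw
  set dw := s.dropWhile (fun x => decide (x ≤ a)) with hdw
  have hsplit : s = tw ++ dw := List.takeWhile_append_dropWhile.symm
  have htle : tw.length ≤ s.length := (List.takeWhile_prefix _).length_le
  rcases Nat.lt_trichotomy k tw.length with h | h | h
  · -- k < tw.length: s[k] lies in the takeWhile prefix, so s[k] ≤ a; spec says a < s[k]
    have hks : k < s.length := lt_of_lt_of_le h htle
    have hg : tw[k]'h = s[k] := (List.takeWhile_prefix _).getElem h
    have hp := List.mem_takeWhile_imp (p := fun x => decide (x ≤ a)) (l := s)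
      (x := tw[k]'h) (by exact List.getElem_mem h)
    rw [hg] at hp
    have h2 : a < s[k] := hk3 k hks (le_refl k)
    simp at hp
    omega
  · exact h
  · -- tw.length < k: s[tw.length] is the head of dropWhile, so a < it; spec says it ≤ a
    have hts : tw.length < s.length := lt_of_lt_of_le h hk1
    have hlen : s.length = tw.length + dw.length := by rw [hsplit]; simp
    have hdne : dw ≠ [] := by
      intro hnil
      rw [hnil] at hlen
      simp at hlen
      omega
    have hhead : decide ((dw.head hdne) ≤ a) = false :=
      List.head_dropWhile_not _ hdne
    have hd0 : 0 < dw.length := by omega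
    have e1 : s[tw.length]'hts = (tw ++ dw)[tw.length]'(by rw [← hsplit]; exact hts) :=
      List.getElem_of_eq hsplit hts
    have e2 : (tw ++ dw)[tw.length]'(by rw [← hsplit]; exact hts) = dw[0]'hd0 := by
      rw [List.getElem_append_right (le_refl tw.length)]
      congr 1
      omega
    have e3 : dw[0]'hd0 = dw.head hdne := (List.head_eq_getElem hdne).symm
    have h1 : s[tw.length]'hts ≤ a := hk2 tw.length hts h
    rw [e1, e2, e3] at h1
    simp at hhead
    omega

-- A's eraseIdx-based step equals the recursive step1/wn (on any list)
theorem erase_form {a : Int} {s : List Int} :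
    ((s.takeWhile (fun x => decide (x ≤ a))).length = s.length ↔ wn a s = false) ∧
    (if (s.takeWhile (fun x => decide (x ≤ a))).length = s.length
       then s.eraseIdx 0 else s.eraseIdx (s.takeWhile (fun x => decide (x ≤ a))).length) = step1 a s := by
  induction s with
  | nil => exact ⟨by simp [wn], by simp [step1]⟩
  | cons x r ih =>
    obtain ⟨ih1, ih2⟩ := ih
    by_cases hax : a < x
    · have ht : (x :: r).takeWhile (fun x => decide (x ≤ a)) = [] := by
        simp [List.takeWhile_cons]; omega
      constructor
      · rw [ht]
        simp [wn_cons, hax]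
      · rw [ht]
        have hstep : step1 a (x :: r) = r := by simp [step1, hax]
        rw [hstep]
        split <;> simp [List.eraseIdx]
    · have hxa : x ≤ a := by omega
      have ht : (x :: r).takeWhile (fun x => decide (x ≤ a))
          = x :: r.takeWhile (fun x => decide (x ≤ a)) := by
        simp [List.takeWhile_cons, hxa]
      constructor
      · rw [ht]
        simp only [List.length_cons, Nat.add_right_cancel_iff, wn_cons]
        rw [ih1]
        simp [hax]
      · rw [ht]
        simp only [List.length_cons, Nat.add_right_cancel_iff]
        by_cases hw : wn a r = false
        · rw [if_pos (ih1.mpr hw)]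
          simp [step1, hax, hw, List.eraseIdx]
        · rw [if_neg (fun hT => hw (ih1.mp hT))]
          rw [List.eraseIdx_cons_succ]
          rw [if_neg (fun hT => hw (ih1.mp hT))] at ih2
          rw [ih2]
          have hwt : wn a r = true := by simpa using hw
          simp [step1, hax, hwt]

theorem solStep_eq {s : List Int} {c a : Int} (hs : s.Pairwise (· ≤ ·)) :
    solStep (s, c) a = stepP (s, c) a := by
  obtain ⟨hiff, hform⟩ := erase_form (a := a) (s := s)
  simp only [solStep, stepP, bisect_tw a hs]
  by_cases h : (s.takeWhile (fun x => decide (x ≤ a))).length = s.length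
  · have hw : wn a s = false := hiff.mp h
    rw [if_pos h] at hform ⊢
    simp [hform, hw]
  · have hw : ¬ wn a s = false := fun hf => h (hiff.mpr hf)
    rw [if_neg h] at hform ⊢
    simp only [Bool.not_eq_false] at hw
    simp [hform, hw]

theorem foldl_sol_eq : ∀ (l : List Int) (s : List Int) (c : Int), s.Pairwise (· ≤ ·) →
    l.foldl solStep (s, c) = l.foldl stepP (s, c) := by
  intro l
  induction l with
  | nil => intro s c _; rfl
  | cons a l' ih =>
    intro s c hs
    simp only [List.foldl_cons]
    rw [solStep_eq hs]
    have h1 : stepP (s, c) a = (step1 a s, if wn a s then c + 1 else c) := rfl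
    rw [h1, ih _ _ (step1_sorted hs)]

-- glue: B's indexed fold equals tp on the dropped suffix
theorem alt_fold (As : List Int) : ∀ (Bs : List Int) (k : Nat),
    Bs.foldl (altStep As) (k : Int) = (k : Int) + tp (As.drop k) Bs := by
  intro Bs
  induction Bs with
  | nil => intro k; simp [tp_nil_right]
  | cons b Bs' ih =>
    intro k
    simp only [List.foldl_cons]
    by_cases hk : k < As.length
    · have hki : (k : Int) < (As.length : Int) := by exact_mod_cast hk
      have hget : As[k]? = some (As[k]'hk) := List.getElem?_eq_getElem hk
      have hdrop : As.drop k = As[k]'hk :: As.drop (k + 1) := List.drop_eq_getElem_cons hk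
      by_cases hab : As[k]'hk < b
      · have hstep : altStep As (k : Int) b = ((k + 1 : Nat) : Int) := by
          simp [altStep, hget, hab, hki]
        rw [hstep, ih (k + 1), hdrop]
        simp only [tp, if_pos hab]
        push_cast
        ring
      · have hstep : altStep As (k : Int) b = (k : Int) := by
          simp [altStep, hget, hab, hki]
        rw [hstep, ih k, hdrop]
        simp only [tp, if_neg hab]
    · have hki : ¬ (k : Int) < (As.length : Int) := by exact_mod_cast hk
      have hstep : altStep As (k : Int) b = (k : Int) := by
        simp [altStep, hki]
      have hdrop : As.drop k = [] := List.drop_eq_nil_of_le (Nat.le_of_not_lt hk)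
      rw [hstep, ih k, hdrop, tp_nil_left, tp_nil_left]

-- ===== VERDICT (by name: the statement is the Claim_ definition above) =====
theorem solution_spec : Claim_equal_solution := by
  intro A B _ hpre
  unfold Spec_solution solution solution_alt
  simp only []
  have hBs : (PySem.List.sorted B (fun x => x)).Pairwise (· ≤ ·) := PySem.List.sorted_pairwise B (fun x => x)
  have hAs : (PySem.List.sorted A (fun x => x)).Pairwise (· ≤ ·) := PySem.List.sorted_pairwise A (fun x => x)
  rw [foldl_sol_eq A _ 0 hBs]
  have hperm : A.Perm (PySem.List.sorted A (fun x => x)) := (PySem.List.sorted_perm A (fun x => x) false).symm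
  rw [foldl_perm hperm _ 0 hBs (by
    rw [PySem.List.length_sorted]
    exact hpre)]
  rw [main_fold _ _ 0 hAs hBs]
  have h0 := alt_fold (PySem.List.sorted A (fun x => x)) (PySem.List.sorted B (fun x => x)) 0
  simp only [Nat.cast_zero, List.drop_zero, zero_add] at h0
  rw [h0]
  exact zero_add _
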